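-- pv_equiv track=rewrite | github.com/slqye/42 | ready_set_boole/ex04.py | get_var_number
-- ===== SOURCE A (Python) =====
-- def get_var_number(formula: str):
-- 	result: int = 0
-- 	double_var: str = ""
--
-- 	for i in formula:
-- 		if i in "ABCDEFGHIJKLMNOPQRSTUVWXYZ" and i not in double_var:
-- 			result += 1
-- 			double_var += i
-- 	return (result)
-- ===== SOURCE B (Python) =====
-- def get_var_number(formula: str):
--     return sum(1 for c in "ABCDEFGHIJKLMNOPQRSTUVWXYZ" if c in formula)
-- ===== Notes on version B (the rewrite author's own statement) =====
-- stated objective: faster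
-- what changed: B inverts the loop: instead of scanning the formula while maintaining a seen-letters accumulator, it iterates over the fixed 26-letter uppercase alphabet and counts how many letters occur in the formula using the native substring test; no dedup state is needed.
import Mathlib
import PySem

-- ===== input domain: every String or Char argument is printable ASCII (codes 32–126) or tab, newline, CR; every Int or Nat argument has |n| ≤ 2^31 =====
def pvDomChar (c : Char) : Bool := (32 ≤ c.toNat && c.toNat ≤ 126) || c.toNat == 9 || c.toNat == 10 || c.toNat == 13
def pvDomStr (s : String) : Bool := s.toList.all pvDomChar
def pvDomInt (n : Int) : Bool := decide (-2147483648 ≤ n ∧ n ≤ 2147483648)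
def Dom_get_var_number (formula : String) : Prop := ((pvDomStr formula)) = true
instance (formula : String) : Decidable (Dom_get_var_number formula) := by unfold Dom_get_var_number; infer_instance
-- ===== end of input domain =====

-- B replaces A's formula scan with a seen-accumulator by a count over the fixed 26-letter alphabet (simpler; equal return value).

-- the uppercase alphabet literal used by both Pythons
def pvUpper : List Char := "ABCDEFGHIJKLMNOPQRSTUVWXYZ".toList

-- ===== PORT A =====
-- Python's `i in "ABC…"` / `i not in double_var` for a single char is char membership;
-- `double_var += i` appends the char. The loop is a fold over the string's chars with state (result, double_var).
def get_var_number (formula : String) : Int :=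
  (formula.toList.foldl
    (fun (st : Int × List Char) i =>
      if i ∈ pvUpper ∧ i ∉ st.2 then (st.1 + 1, st.2 ++ [i]) else st)
    (0, [])).1

-- ===== PORT B =====
-- `sum(1 for c in "ABC…" if c in formula)` = count of alphabet letters occurring in formula
def get_var_number_alt (formula : String) : Int :=
  ((pvUpper.filter (fun c => c ∈ formula.toList)).length : Int)

-- ===== PRECONDITION & SPEC =====
def Spec_get_var_number (formula : String) (out : Int) : Prop := out = get_var_number_alt formula
instance (formula : String) (out : Int) : Decidable (Spec_get_var_number formula out) := by unfold Spec_get_var_number; infer_instance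

-- ===== CLAIM (what is proved, stated in full; the proofs are below) =====
def Claim_equal_get_var_number : Prop := ∀ (formula : String), Dom_get_var_number formula → Spec_get_var_number formula (get_var_number formula)

-- ===== LEMMAS AND PROOFS =====

def pvStep (st : Int × List Char) (i : Char) : Int × List Char :=
  if i ∈ pvUpper ∧ i ∉ st.2 then (st.1 + 1, st.2 ++ [i]) else st

lemma pvStep_fst (s : List Char) (st : Int × List Char)
    (h : st.1 = (st.2.length : Int)) :
    (s.foldl pvStep st).1 = (((s.foldl pvStep st).2).length : Int) := by
  induction s generalizing st with
  | nil => simpa using h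
  | cons i rest ih =>
    simp only [List.foldl_cons]
    apply ih
    unfold pvStep
    split
    · simp [h]
    · exact h

lemma pvStep_mem (s : List Char) (st : Int × List Char) (c : Char) :
    c ∈ (s.foldl pvStep st).2 ↔ c ∈ st.2 ∨ (c ∈ pvUpper ∧ c ∈ s) := by
  induction s generalizing st with
  | nil => simp
  | cons i rest ih =>
    simp only [List.foldl_cons, ih]
    unfold pvStep
    by_cases hc : c = i
    · subst hc
      split <;> rename_i h
      · simp_all
      · simp_all
        tauto
    · split <;> simp [hc]
lemma pvStep_nodup (s : List Char) (st : Int × List Char)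
    (h : st.2.Nodup) : ((s.foldl pvStep st).2).Nodup := by
  induction s generalizing st with
  | nil => simpa using h
  | cons i rest ih =>
    simp only [List.foldl_cons]
    apply ih
    unfold pvStep
    split <;> rename_i hcond
    · rw [List.nodup_append]
      refine ⟨h, List.nodup_singleton i, ?_⟩
      intro a ha b hb
      rw [List.mem_singleton] at hb
      subst hb
      exact fun he => hcond.2 (he ▸ ha)
    · exact h

lemma pvUpper_nodup : pvUpper.Nodup := by decide

theorem get_var_number_spec : Claim_equal_get_var_number := by
  intro formula _
  unfold Spec_get_var_number get_var_number get_var_number_alt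
  set s := formula.toList
  have hfold : (s.foldl pvStep ((0 : Int), ([] : List Char))) =
      (s.foldl (fun (st : Int × List Char) i =>
        if i ∈ pvUpper ∧ i ∉ st.2 then (st.1 + 1, st.2 ++ [i]) else st) (0, [])) := rfl
  rw [← hfold]
  have h1 := pvStep_fst s ((0 : Int), ([] : List Char)) (by simp)
  rw [h1]
  have hnd : ((s.foldl pvStep ((0 : Int), ([] : List Char))).2).Nodup :=
    pvStep_nodup s _ (by simp)
  have hndf : (pvUpper.filter (fun c => c ∈ s)).Nodup :=
    pvUpper_nodup.filter _
  have hlen : ((s.foldl pvStep ((0 : Int), ([] : List Char))).2).length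
      = (pvUpper.filter (fun c => c ∈ s)).length := by
    rw [← List.toFinset_card_of_nodup hnd, ← List.toFinset_card_of_nodup hndf]
    congr 1
    ext c
    simp [pvStep_mem]
  exact_mod_cast hlen
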